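-- pv_equiv track=rewrite | github.com/criskb/MKRShift_Nodes | xshader.py | _find_ternary_colon
-- ===== SOURCE A (Python) =====
-- def _find_ternary_colon(text: str, question_idx: int) -> int:
--     depth = 0
--     ternary_depth = 0
--     for idx in range(question_idx + 1, len(text)):
--         ch = text[idx]
--         if ch in "([{":
--             depth += 1
--         elif ch in ")]}":
--             depth = max(0, depth - 1)
--         elif depth == 0:
--             if ch == "?":
--                 ternary_depth += 1
--             elif ch == ":":
--                 if ternary_depth == 0:
--                     return idx
--                 ternary_depth -= 1
--     return -1
-- ===== SOURCE B (Python) =====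
-- def _find_ternary_colon(text: str, question_idx: int) -> int:
--     depth = 0
--     idx = question_idx + 1
--     n = len(text)
--     while idx < n:
--         ch = text[idx]
--         if ch in "([{":
--             depth += 1
--         elif ch in ")]}":
--             depth = max(0, depth - 1)
--         elif depth == 0:
--             if ch == "?":
--                 colon_idx = _find_ternary_colon(text, idx)
--                 if colon_idx == -1:
--                     return -1
--                 idx = colon_idx + 1
--                 continue
--             elif ch == ":":
--                 return idx
--         idx += 1
--     return -1
-- ===== Notes on version B (the rewrite author's own statement) =====
-- stated objective: alternative
-- what changed: Replaced the ternary_depth counter with direct recursion: a '?' seen at bracket depth 0 triggers a recursive call that finds that ternary's own colon, and the scan resumes just past it (propagating -1).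
-- outside the precondition, e.g. on _find_ternary_colon('(?):', -4): A returns 3, B returns -1; on _find_ternary_colon('ab:', -9): A raises IndexError, B raises IndexError
import Mathlib
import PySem

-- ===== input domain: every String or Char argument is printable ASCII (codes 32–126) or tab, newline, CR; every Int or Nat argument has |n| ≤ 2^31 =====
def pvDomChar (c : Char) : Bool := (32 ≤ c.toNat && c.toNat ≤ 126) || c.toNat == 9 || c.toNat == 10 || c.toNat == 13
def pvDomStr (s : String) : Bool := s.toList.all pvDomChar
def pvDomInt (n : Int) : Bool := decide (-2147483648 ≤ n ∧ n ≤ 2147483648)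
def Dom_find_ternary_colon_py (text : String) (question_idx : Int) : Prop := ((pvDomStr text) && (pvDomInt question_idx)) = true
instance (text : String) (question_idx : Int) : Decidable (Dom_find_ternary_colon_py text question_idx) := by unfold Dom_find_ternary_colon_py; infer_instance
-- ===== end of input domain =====

-- B replaces A's ternary_depth counter by direct recursion (find the nested ternary's colon, resume past it);
-- objective: alternative decomposition of the same scan, same return value on the stated domain.

-- ch in "([{" / ch in ")]}" (single characters, so substring membership = character membership)
def pvIsOpen (c : Char) : Bool := c == '(' || c == '[' || c == '{'
def pvIsClose (c : Char) : Bool := c == ')' || c == ']' || c == '}'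

-- ===== PORT A =====
-- the for-loop of A over range(question_idx+1, len(text)), state (depth, ternary_depth)
def pvGoA (cs : List Char) (idxs : List Int) (depth tern : Int) : Int :=
  match idxs with
  | [] => -1
  | idx :: rest =>
    match PySem.List.pyGet? cs idx with
    | none => -1   -- IndexError; excluded by Pre_
    | some ch =>
      if pvIsOpen ch then pvGoA cs rest (depth + 1) tern
      else if pvIsClose ch then pvGoA cs rest (max 0 (depth - 1)) tern
      else if depth = 0 then
        if ch = '?' then pvGoA cs rest depth (tern + 1)
        else if ch = ':' then
          (if tern = 0 then idx else pvGoA cs rest depth (tern - 1))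
        else pvGoA cs rest depth tern
      else pvGoA cs rest depth tern

def find_ternary_colon_py (text : String) (question_idx : Int) : Int :=
  pvGoA text.toList (PySem.List.pyRange (question_idx + 1) (text.toList.length : Int) 1) 0 0

-- ===== PORT B =====
-- the while-loop of B; fuel only makes the recursion total (one unit per loop step / recursive call)
def pvGoB (cs : List Char) : Nat → Int → Int → Int
  | 0, _, _ => -1
  | fuel + 1, idx, depth =>
    if idx < (cs.length : Int) then
      match PySem.List.pyGet? cs idx with
      | none => -1   -- IndexError; excluded by Pre_
      | some ch =>
        if pvIsOpen ch then pvGoB cs fuel (idx + 1) (depth + 1)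
        else if pvIsClose ch then pvGoB cs fuel (idx + 1) (max 0 (depth - 1))
        else if depth = 0 then
          if ch = '?' then
            -- colon_idx = _find_ternary_colon(text, idx); resume at colon_idx + 1
            (if pvGoB cs fuel (idx + 1) 0 = -1 then -1
             else pvGoB cs fuel (pvGoB cs fuel (idx + 1) 0 + 1) depth)
          else if ch = ':' then idx
          else pvGoB cs fuel (idx + 1) depth
        else pvGoB cs fuel (idx + 1) depth
    else -1

def find_ternary_colon_py_alt (text : String) (question_idx : Int) : Int :=
  pvGoB text.toList (text.toList.length + 1) (question_idx + 1) 0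

-- ===== PRECONDITION & SPEC =====
-- Pre_ restricts to the natural domain (question_idx is the position of a '?', so ≥ 0; -1 is the harmless
-- whole-string scan): for question_idx ≤ -2 Python's negative-index wraparound makes A scan from the end of
-- the string, raise IndexError when question_idx+1 < -len(text), and collide the -1 'not found' sentinel
-- with the valid index -1, so A's values there are accidental.
def Pre_find_ternary_colon_py (text : String) (question_idx : Int) : Prop :=
  0 ≤ question_idx + 1
instance (text : String) (question_idx : Int) : Decidable (Pre_find_ternary_colon_py text question_idx) := by
  unfold Pre_find_ternary_colon_py; infer_instance

def pvWitness_find_ternary_colon_py : String × Int := ("a ? b : c", 2)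

def Spec_find_ternary_colon_py (text : String) (question_idx : Int) (out : Int) : Prop :=
  out = find_ternary_colon_py_alt text question_idx
instance (text : String) (question_idx : Int) (out : Int) : Decidable (Spec_find_ternary_colon_py text question_idx out) := by
  unfold Spec_find_ternary_colon_py; infer_instance

-- ===== CLAIM (what is proved, stated in full; the proofs are below) =====
def Claim_equal_find_ternary_colon_py : Prop := ∀ (text : String) (question_idx : Int), Dom_find_ternary_colon_py text question_idx → Pre_find_ternary_colon_py text question_idx → Spec_find_ternary_colon_py text question_idx (find_ternary_colon_py text question_idx)

-- ===== LEMMAS AND PROOFS =====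

-- A's result is -1 or one of the scanned indices
theorem pvGoA_mem (cs : List Char) : ∀ (idxs : List Int) (d t : Int),
    pvGoA cs idxs d t = -1 ∨ pvGoA cs idxs d t ∈ idxs := by
  intro idxs
  induction idxs with
  | nil => intro d t; left; rfl
  | cons idx rest ih =>
    intro d t
    simp only [pvGoA]
    cases PySem.List.pyGet? cs idx with
    | none => left; rfl
    | some ch =>
      simp only
      split_ifs with h1 h2 h3 h4 h5 h6 <;>
        first
          | (right; exact List.mem_cons_self)
          | (rcases ih _ _ with h | h
             · left; exact h
             · right; exact List.mem_cons_of_mem _ h)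

-- ternary_depth unfolding: scanning with counter t+1 = find the nested colon with counter 0, resume past it with counter t
theorem pvGoA_succ (cs : List Char) : ∀ (k : Nat) (i d t : Int),
    ((cs.length : Int) - i).toNat ≤ k → 0 ≤ i → 0 ≤ t →
    pvGoA cs (PySem.List.pyRange i (cs.length : Int) 1) d (t + 1) =
      (if pvGoA cs (PySem.List.pyRange i (cs.length : Int) 1) d 0 = -1 then -1
       else pvGoA cs (PySem.List.pyRange (pvGoA cs (PySem.List.pyRange i (cs.length : Int) 1) d 0 + 1) (cs.length : Int) 1) 0 t) := by
  intro k
  induction k with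
  | zero =>
    intro i d t hk hi ht
    have hni : (cs.length : Int) ≤ i := by omega
    rw [PySem.List.pyRange_one_eq_nil hni]
    simp [pvGoA]
  | succ k ih =>
    intro i d t hk hi ht
    by_cases hni : (cs.length : Int) ≤ i
    · rw [PySem.List.pyRange_one_eq_nil hni]
      simp [pvGoA]
    · replace hni : i < (cs.length : Int) := by omega
      rw [PySem.List.pyRange_one_cons hni]
      have hg : PySem.List.pyGet? cs i = some cs[i.toNat] :=
        PySem.List.pyGet?_eq_some_getElem cs hi hni
      simp only [pvGoA, hg]
      by_cases h1 : pvIsOpen cs[i.toNat]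
      · simp only [if_pos h1]
        exact ih (i + 1) (d + 1) t (by omega) (by omega) ht
      · simp only [if_neg h1]
        by_cases h2 : pvIsClose cs[i.toNat]
        · simp only [if_pos h2]
          exact ih (i + 1) (max 0 (d - 1)) t (by omega) (by omega) ht
        · simp only [if_neg h2]
          by_cases h3 : d = 0
          · subst h3
            by_cases h4 : cs[i.toNat] = '?'
            · simp only [if_pos h4]
              rw [ih (i + 1) 0 (t + 1) (by omega) (by omega) (by omega),
                  ih (i + 1) 0 0 (by omega) (by omega) le_rfl]
              by_cases hz : pvGoA cs (PySem.List.pyRange (i + 1) (cs.length : Int) 1) 0 0 = -1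
              · simp [hz]
              · simp only [if_neg hz, ite_true]
                have hmem : pvGoA cs (PySem.List.pyRange (i + 1) (cs.length : Int) 1) 0 0 ∈
                    PySem.List.pyRange (i + 1) (cs.length : Int) 1 := by
                  rcases pvGoA_mem cs (PySem.List.pyRange (i + 1) (cs.length : Int) 1) 0 0 with h | h
                  · exact absurd h hz
                  · exact h
                rw [PySem.List.mem_pyRange_one] at hmem
                rw [ih (pvGoA cs (PySem.List.pyRange (i + 1) (cs.length : Int) 1) 0 0 + 1) 0 t
                      (by omega) (by omega) ht]
            · simp only [if_neg h4]
              by_cases h5 : cs[i.toNat] = ':'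
              · simp only [if_pos h5]
                simp [show ¬ (t + 1 = 0) by omega, show ¬ (i = -1) by omega,
                      show t + 1 - 1 = t by ring]
              · simp only [if_neg h5]
                exact ih (i + 1) 0 t (by omega) (by omega) ht
          · simp only [if_neg h3]
            exact ih (i + 1) d t (by omega) (by omega) ht

-- B with enough fuel computes A's scan with counter 0
theorem pvGoB_eq_pvGoA (cs : List Char) : ∀ (f : Nat) (i d : Int),
    0 ≤ i → (cs.length : Int) < i + f →
    pvGoB cs f i d = pvGoA cs (PySem.List.pyRange i (cs.length : Int) 1) d 0 := by
  intro f
  induction f with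
  | zero =>
    intro i d hi hf
    rw [PySem.List.pyRange_one_eq_nil (by omega : (cs.length : Int) ≤ i)]
    simp [pvGoB, pvGoA]
  | succ f ih =>
    intro i d hi hf
    by_cases hni : (cs.length : Int) ≤ i
    · rw [PySem.List.pyRange_one_eq_nil hni]
      simp [pvGoB, pvGoA, show ¬ (i < (cs.length : Int)) by omega]
    · replace hni : i < (cs.length : Int) := by omega
      rw [PySem.List.pyRange_one_cons hni]
      have hg : PySem.List.pyGet? cs i = some cs[i.toNat] :=
        PySem.List.pyGet?_eq_some_getElem cs hi hni
      simp only [pvGoB, pvGoA, hg, if_pos hni]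
      by_cases h1 : pvIsOpen cs[i.toNat]
      · simp only [if_pos h1]
        exact ih (i + 1) (d + 1) (by omega) (by omega)
      · simp only [if_neg h1]
        by_cases h2 : pvIsClose cs[i.toNat]
        · simp only [if_pos h2]
          exact ih (i + 1) (max 0 (d - 1)) (by omega) (by omega)
        · simp only [if_neg h2]
          by_cases h3 : d = 0
          · subst h3
            by_cases h4 : cs[i.toNat] = '?'
            · simp only [if_pos h4]
              rw [ih (i + 1) 0 (by omega) (by omega)]
              rw [pvGoA_succ cs ((cs.length : Int) - (i + 1)).toNat (i + 1) 0 0 le_rfl (by omega) le_rfl]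
              by_cases hz : pvGoA cs (PySem.List.pyRange (i + 1) (cs.length : Int) 1) 0 0 = -1
              · simp [hz]
              · simp only [if_neg hz, ite_true]
                have hmem : pvGoA cs (PySem.List.pyRange (i + 1) (cs.length : Int) 1) 0 0 ∈
                    PySem.List.pyRange (i + 1) (cs.length : Int) 1 := by
                  rcases pvGoA_mem cs (PySem.List.pyRange (i + 1) (cs.length : Int) 1) 0 0 with h | h
                  · exact absurd h hz
                  · exact h
                rw [PySem.List.mem_pyRange_one] at hmem
                exact ih (pvGoA cs (PySem.List.pyRange (i + 1) (cs.length : Int) 1) 0 0 + 1) 0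
                  (by omega) (by omega)
            · simp only [if_neg h4]
              by_cases h5 : cs[i.toNat] = ':'
              · simp [h5]
              · simp only [if_neg h5]
                exact ih (i + 1) 0 (by omega) (by omega)
          · simp only [if_neg h3]
            exact ih (i + 1) d (by omega) (by omega)

-- ===== VERDICT (by name: the statement is the Claim_ definition above) =====
theorem find_ternary_colon_py_spec : Claim_equal_find_ternary_colon_py := by
  intro text q _ hpre
  unfold Pre_find_ternary_colon_py at hpre
  unfold Spec_find_ternary_colon_py find_ternary_colon_py find_ternary_colon_py_alt
  rw [pvGoB_eq_pvGoA text.toList (text.toList.length + 1) (q + 1) 0 hpre (by push_cast; omega)]
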